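-- pv_equiv track=rewrite | github.com/eatseng/built_robotics_challenge | jumbo_solver.py | get_subset_without_dup
-- ===== SOURCE A (Python) =====
-- def get_subset_without_dup(chars):
--
--     # 1. We create subset by continuously appending new char with existing
--
--     # elements in the subset, creating a new subset while also preserving the
--
--     # original subset.
--
--     # 2. We avoid creating duplicates by counting the number of repeating chars
--
--     # and creating subset of identical char array of k size (where k is the
--
--     # number of repeats) and append them using #1 algorithm
--
--     subset, cache = [[]], {}
--
--     for char in chars:
--
--         if char not in cache:
--
--             cache[char] = 0
--
--         cache[char] += 1
--
--     for key in cache: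
--
--         copy_subset = [item for item in subset]
--
--         repeats = [[key for i in range(n + 1)] for n in range(cache[key])]
--
--         for intermediate in repeats:
--
--             subset += [copy + intermediate for copy in copy_subset]
--
--     return subset
-- ===== SOURCE B (Python) =====
-- def get_subset_without_dup(chars):
--     counts = {}
--     for ch in chars:
--         counts[ch] = counts.get(ch, 0) + 1
--
--     def build(items):
--         if not items:
--             return [[]]
--         ch, c = items[-1]
--         prefixes = build(items[:-1])
--         return [p + [ch] * r for r in range(c + 1) for p in prefixes]
--
--     return build(list(counts.items()))
-- ===== Notes on version B (the rewrite author's own statement) =====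
-- stated objective: simpler
-- what changed: A grows one subset list in place per key, materialising explicit `repeats` lists of identical chars and appending products to a snapshot; B counts once and then builds the result by a recursion over the counted items from the last key backwards, a single comprehension per key with [ch]*r.
import Mathlib
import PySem

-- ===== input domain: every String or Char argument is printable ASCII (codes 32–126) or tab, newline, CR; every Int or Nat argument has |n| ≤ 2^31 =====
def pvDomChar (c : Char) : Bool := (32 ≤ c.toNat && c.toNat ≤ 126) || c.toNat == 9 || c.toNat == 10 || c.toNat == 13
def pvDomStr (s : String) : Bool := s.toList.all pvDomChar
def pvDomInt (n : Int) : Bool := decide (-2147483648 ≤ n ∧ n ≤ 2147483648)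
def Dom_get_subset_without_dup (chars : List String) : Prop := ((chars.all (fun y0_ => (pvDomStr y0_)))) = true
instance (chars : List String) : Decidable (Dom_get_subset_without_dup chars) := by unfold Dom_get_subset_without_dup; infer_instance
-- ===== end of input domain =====

-- B replaces A's in-place subset growing (explicit `repeats` lists of identical chars
-- appended to a snapshot of the subset list) by a recursion over the counted items that
-- builds the result back-to-front from the last key; objective: simpler.

-- ===== PORT A =====
def get_subset_without_dup (chars : List String) : List (List String) :=
  -- subset, cache = [[]], {}
  -- for char in chars: if char not in cache: cache[char] = 0; cache[char] += 1
  let cache : PySem.Dict String Int :=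
    chars.foldl (fun d char =>
      let d := if d.contains char then d else d.insert char 0
      d.insert char (d.getD char 0 + 1)) PySem.Dict.empty
  -- for key in cache: copy_subset = …; repeats = …; for intermediate in repeats: subset += …
  cache.keys.foldl (fun subset key =>
    let copy_subset := subset.map (fun item => item)
    let repeats := (PySem.List.pyRange 0 (cache.getD key 0) 1).map
      (fun n => (PySem.List.pyRange 0 (n + 1) 1).map (fun _ => key))
    repeats.foldl (fun subset intermediate =>
      subset ++ copy_subset.map (fun copy => copy ++ intermediate)) subset) [[]]

-- ===== PORT B =====
-- def build(items): if not items: return [[]]; ch, c = items[-1]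
--   prefixes = build(items[:-1]); return [p + [ch] * r for r in range(c + 1) for p in prefixes]
def pvBuild (items : List (String × Int)) : List (List String) :=
  if h : items = [] then [[]]
  else
    let p := items.getLast h
    let prefixes := pvBuild items.dropLast
    (PySem.List.pyRange 0 (p.2 + 1) 1).flatMap
      (fun r => prefixes.map (fun q => q ++ PySem.List.pyRepeat [p.1] r))
termination_by items.length
decreasing_by
  have := List.length_pos_of_ne_nil h
  simp [List.length_dropLast]
  omega

def get_subset_without_dup_alt (chars : List String) : List (List String) :=
  -- counts[ch] = counts.get(ch, 0) + 1
  let counts : PySem.Dict String Int :=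
    chars.foldl (fun d ch => d.insert ch (d.getD ch 0 + 1)) PySem.Dict.empty
  pvBuild counts.items

-- ===== PRECONDITION & SPEC =====
def Spec_get_subset_without_dup (chars : List String) (out : List (List String)) : Prop := out = get_subset_without_dup_alt chars
instance (chars : List String) (out : List (List String)) : Decidable (Spec_get_subset_without_dup chars out) := by unfold Spec_get_subset_without_dup; infer_instance

-- ===== CLAIM (what is proved, stated in full; the proofs are below) =====
def Claim_equal_get_subset_without_dup : Prop := ∀ (chars : List String), Dom_get_subset_without_dup chars → Spec_get_subset_without_dup chars (get_subset_without_dup chars)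

-- ===== LEMMAS AND PROOFS =====

-- A's inner body, as a function of the current subset, the key and its count.
def pvInnerA (s : List (List String)) (key : String) (c : Int) : List (List String) :=
  let copy_subset := s.map (fun item => item)
  let repeats := (PySem.List.pyRange 0 c 1).map
    (fun n => (PySem.List.pyRange 0 (n + 1) 1).map (fun _ => key))
  repeats.foldl (fun subset intermediate =>
    subset ++ copy_subset.map (fun copy => copy ++ intermediate)) s

lemma pvBuild_nil : pvBuild [] = [[]] := by
  rw [pvBuild]; simp

lemma pvBuild_concat (items : List (String × Int)) (k : String) (c : Int) :
    pvBuild (items ++ [(k, c)]) =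
      (PySem.List.pyRange 0 (c + 1) 1).flatMap
        (fun r => (pvBuild items).map (fun q => q ++ PySem.List.pyRepeat [k] r)) := by
  rw [pvBuild]
  simp

-- A's cache-building step is the counting step `d[ch] = d.get(ch, 0) + 1`.
lemma pvCacheStep_eq (d : PySem.Dict String Int) (c : String) :
    (let d' := if d.contains c then d else d.insert c 0; d'.insert c (d'.getD c 0 + 1))
      = d.insert c (d.getD c 0 + 1) := by
  by_cases h : d.contains c
  · simp [h]
  · simp only [h, Bool.false_eq_true, if_false]
    rw [PySem.Dict.getD_insert_self, PySem.Dict.insert_insert_self]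
    have h2 : d.get? c = none := by rw [PySem.Dict.get?_eq_none_iff_contains]; simpa using h
    simp [PySem.Dict.getD, h2]

-- One pass of A's key loop is B's flatMap over range(c + 1).
lemma pvInnerA_eq (s : List (List String)) (k : String) (c : Int) (hc : 0 ≤ c) :
    pvInnerA s k c =
      (PySem.List.pyRange 0 (c + 1) 1).flatMap
        (fun r => s.map (fun q => q ++ PySem.List.pyRepeat [k] r)) := by
  unfold pvInnerA
  rw [PySem.List.foldl_append_eq_flatMap,
    PySem.List.pyRange_one_cons (by omega : (0:Int) < c + 1), List.flatMap_cons]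
  simp only [List.map_id', PySem.List.pyRepeat_singleton]
  norm_num
  rw [PySem.List.pyRange_one 1 (c + 1), PySem.List.pyRange_one 0 c]
  norm_num
  rw [List.flatMap_map, List.flatMap_map]
  congr 1
  funext j
  congr 1
  funext q
  simp only [Function.comp_apply]
  have : ((j : Int) + 1).toNat = ((1 : Int) + (j : Int)).toNat := by omega
  rw [this]

-- Folding A's inner step over the items equals B's back-to-front recursion.
lemma pvFoldl_eq_build (items : List (String × Int)) (h : ∀ p ∈ items, 0 ≤ p.2) :
    items.foldl (fun s p => pvInnerA s p.1 p.2) [[]] = pvBuild items := by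
  induction items using List.reverseRecOn with
  | nil => simp [pvBuild_nil]
  | append_singleton l p ih =>
    obtain ⟨k, c⟩ := p
    rw [List.foldl_append, List.foldl_cons, List.foldl_nil, pvBuild_concat,
      ih (fun q hq => h q (List.mem_append_left _ hq)),
      pvInnerA_eq _ _ _ (h (k, c) (by simp))]

lemma pvA_eq_foldl_set (chars : List String) :
    get_subset_without_dup chars =
      (PySem.Set.ofList chars).foldl
        (fun s kk => pvInnerA s kk ((chars.count kk : Int))) [[]] := by
  unfold get_subset_without_dup
  have h1 : (chars.foldl (fun d char =>
      let d := if d.contains char then d else d.insert char 0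
      d.insert char (d.getD char 0 + 1)) PySem.Dict.empty) = PySem.Dict.counter chars := by
    have : (fun (d : PySem.Dict String Int) char =>
        let d' := if d.contains char then d else d.insert char 0
        d'.insert char (d'.getD char 0 + 1)) =
        (fun d ch => d.insert ch (d.getD ch 0 + 1)) := by
      funext d c; exact pvCacheStep_eq d c
    rw [this, PySem.Dict.foldl_insert_getD_add_one_eq_counter]
  rw [h1]
  simp only [PySem.Dict.keys_counter, PySem.Dict.getD_counter]
  rfl

-- ===== VERDICT (by name: the statement is the Claim_ definition above) =====
theorem get_subset_without_dup_spec : Claim_equal_get_subset_without_dup := by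
  intro chars _
  unfold Spec_get_subset_without_dup get_subset_without_dup_alt
  rw [PySem.Dict.foldl_insert_getD_add_one_eq_counter]
  simp only [PySem.Dict.items_counter]
  rw [pvA_eq_foldl_set,
    ← pvFoldl_eq_build _ (by rintro p hp; simp only [List.mem_map] at hp
                             obtain ⟨k, _, rfl⟩ := hp; positivity),
    List.foldl_map]
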